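-- pv_equiv track=rewrite | github.com/lilly9117/Programmers_Algorithm_HBYM | Hyebin/Lv2_영어끝말잇기.py | solution
-- ===== SOURCE A (Python) =====
-- def solution(n, words):
--     answer = [0,0]
--     count = 1
--     for i in range(1,len(words)):
--         count %= n
--         if words[i] in words[0:i] or words[i-1][-1] != words[i][0]:
--             answer = [count+1, i//n+1]
--             return answer
--         count+=1
--     return answer
-- ===== SOURCE B (Python) =====
-- def solution(n, words):
--     # first repeated word, found once via a first-occurrence set
--     first_dup = None
--     seen = set()
--     for i, w in enumerate(words):
--         if w in seen:
--             first_dup = i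
--             break
--         seen.add(w)
--     # first chain break, scanned only strictly before the first duplicate
--     # (a break at or after the duplicate can never be the earlier violation)
--     limit = first_dup if first_dup is not None else len(words)
--     first_break = None
--     for i in range(1, limit):
--         if words[i - 1][-1] != words[i][0]:
--             first_break = i
--             break
--     bad = first_break if first_break is not None else first_dup
--     if bad is None:
--         return [0, 0]
--     return [bad % n + 1, bad // n + 1]
-- ===== Notes on version B (the rewrite author's own statement) =====
-- stated objective: alternative
-- what changed: A's single interleaved early-return loop with a running counter and an O(i) prefix-membership scan per step is replaced by two decoupled scans: first the first-duplicate index via a first-occurrence set, then the first chain break scanned only strictly before that duplicate; the answer is computed in closed form as bad % n + 1, bad // n + 1.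
import Mathlib
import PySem

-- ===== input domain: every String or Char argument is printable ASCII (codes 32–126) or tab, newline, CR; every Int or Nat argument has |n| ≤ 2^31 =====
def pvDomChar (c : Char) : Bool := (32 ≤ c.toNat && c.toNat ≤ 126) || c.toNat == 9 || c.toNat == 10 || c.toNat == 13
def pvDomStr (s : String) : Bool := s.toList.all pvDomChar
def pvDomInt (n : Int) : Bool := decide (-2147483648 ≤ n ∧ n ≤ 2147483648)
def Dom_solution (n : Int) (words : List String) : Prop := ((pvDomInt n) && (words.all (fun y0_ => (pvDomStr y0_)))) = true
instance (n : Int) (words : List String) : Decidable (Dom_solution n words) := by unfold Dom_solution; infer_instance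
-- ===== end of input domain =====

-- B replaces A's single interleaved early-return loop (running counter + O(i) prefix
-- membership scan) by two decoupled scans: the first duplicate via a first-occurrence
-- set, then the first chain break scanned only strictly before that duplicate, with
-- the answer computed in closed form from the earlier violating index.

-- ===== PORT A =====
-- the for-loop of A over range(1, len(words)) with early return; count is the loop state
def solutionLoopA (n : Int) (words : List String) : List Int → Int → List Int
  | [], _ => [0, 0]                          -- loop ends: return answer = [0,0]
  | i :: rest, count =>
      let count2 := PySem.Int.mod count n    -- count %= n
      let wi := (PySem.List.pyGet? words i).getD ""
      let prev := (PySem.List.pyGet? words (i - 1)).getD ""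
      -- words[i] in words[0:i] or words[i-1][-1] != words[i][0]
      if wi ∈ PySem.List.slice words (some 0) (some i) ∨
         PySem.Str.pyGet? prev (-1) ≠ PySem.Str.pyGet? wi 0 then
        [count2 + 1, PySem.Int.floordiv i n + 1]
      else
        solutionLoopA n words rest (count2 + 1)

def solution (n : Int) (words : List String) : List Int :=
  solutionLoopA n words (PySem.List.pyRange 1 (words.length : Int) 1) 1

-- ===== PORT B =====
-- first loop of B: for i, w in enumerate(words) with a first-occurrence seen set
def dupScan : List String → Int → PySem.Set String → Option Int
  | [], _, _ => none
  | w :: rest, i, seen =>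
      if w ∈ seen then some i
      else dupScan rest (i + 1) (PySem.Set.add seen w)

-- second loop of B: first i in range(1, limit) with words[i-1][-1] != words[i][0]
def breakScan (words : List String) : List Int → Option Int
  | [] => none
  | i :: rest =>
      let prev := (PySem.List.pyGet? words (i - 1)).getD ""
      let wi := (PySem.List.pyGet? words i).getD ""
      if PySem.Str.pyGet? prev (-1) ≠ PySem.Str.pyGet? wi 0 then some i
      else breakScan words rest

def solution_alt (n : Int) (words : List String) : List Int :=
  let fd := dupScan words 0 PySem.Set.empty
  let limit := match fd with | none => (words.length : Int) | some d => d
  let fb := breakScan words (PySem.List.pyRange 1 limit 1)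
  match fb with
  | some b => [PySem.Int.mod b n + 1, PySem.Int.floordiv b n + 1]
  | none =>
      match fd with
      | none => [0, 0]
      | some d => [PySem.Int.mod d n + 1, PySem.Int.floordiv d n + 1]

-- ===== PRECONDITION & SPEC =====
-- Pre_ excludes exactly the inputs on which the Python A raises: n = 0 with at least two
-- words (ZeroDivisionError at count %= n), and inputs where A's loop reaches an adjacency
-- with an empty word without the duplicate test saving it (IndexError on ""[-1]/""[0]).
-- duplicate test at index i (words[i] in words[0:i])
def dupB (words : List String) (i : Nat) : Bool := (words.take i).contains (words.getD i "")
-- an adjacency (i-1, i) involving an empty word (where the chain test would index-error)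
def emptyAdj (words : List String) (i : Nat) : Bool :=
  (words.getD (i - 1) "x" == "") || (words.getD i "x" == "")
-- a chain break at j between two nonempty words (where A surely stops)
def goodBreak (words : List String) (j : Nat) : Bool :=
  (1 ≤ j) && (words.getD (j - 1) "" != "") && (words.getD j "" != "") &&
    ((words.getD (j - 1) "").toList.getLast? != (words.getD j "").toList.head?)

def Pre_solution (n : Int) (words : List String) : Prop :=
  words.length ≤ 1 ∨
  (n ≠ 0 ∧ ∀ i ∈ List.range words.length, 1 ≤ i → emptyAdj words i = true →
    dupB words i = false →
    ∃ j ∈ List.range i, 1 ≤ j ∧ (dupB words j || goodBreak words j) = true)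
instance (n : Int) (words : List String) : Decidable (Pre_solution n words) := by
  unfold Pre_solution; infer_instance

def pvWitness_solution : Int × List String := (3, ["ab", "ba", "ab"])

def Spec_solution (n : Int) (words : List String) (out : List Int) : Prop := out = solution_alt n words
instance (n : Int) (words : List String) (out : List Int) : Decidable (Spec_solution n words out) := by unfold Spec_solution; infer_instance

-- ===== CLAIM (what is proved, stated in full; the proofs are below) =====
def Claim_equal_solution : Prop := ∀ (n : Int) (words : List String), Dom_solution n words → Pre_solution n words → Spec_solution n words (solution n words)

-- ===== LEMMAS AND PROOFS =====

-- the two violation predicates, as pure predicates on the index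
def dupAt (words : List String) (i : Int) : Bool :=
  decide ((PySem.List.pyGet? words i).getD "" ∈ PySem.List.slice words (some 0) (some i))

def breakAt (words : List String) (i : Int) : Bool :=
  decide (PySem.Str.pyGet? ((PySem.List.pyGet? words (i - 1)).getD "") (-1) ≠
          PySem.Str.pyGet? ((PySem.List.pyGet? words i).getD "") 0)

-- first index in [i, m) satisfying p
def ffind (p : Int → Bool) (m : Int) (i : Int) : Option Int :=
  if h : i < m then (if p i then some i else ffind p m (i + 1)) else none
  termination_by (m - i).toNat
  decreasing_by omega

def omin : Option Int → Option Int → Option Int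
  | none, o => o
  | o, none => o
  | some a, some b => some (min a b)

theorem ffind_step (p : Int → Bool) {m i : Int} (hi : i < m) :
    ffind p m i = if p i then some i else ffind p m (i + 1) := by
  rw [ffind]; exact dif_pos hi

theorem ffind_stop (p : Int → Bool) {m i : Int} (hi : ¬ i < m) : ffind p m i = none := by
  rw [ffind]; exact dif_neg hi

theorem ffind_ge (p : Int → Bool) (m i j : Int) (h : ffind p m i = some j) : i ≤ j := by
  induction i using ffind.induct p m with
  | case1 i hi hp => rw [ffind_step p hi, if_pos hp] at h; injection h with h; omega
  | case2 i hi hp ih =>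
      rw [ffind_step p hi, if_neg hp] at h
      have := ih h; omega
  | case3 i hi => rw [ffind_stop p hi] at h; exact absurd h (by simp)

theorem ffind_lt (p : Int → Bool) (m i j : Int) (h : ffind p m i = some j) : j < m := by
  induction i using ffind.induct p m with
  | case1 i hi hp => rw [ffind_step p hi, if_pos hp] at h; injection h with h; omega
  | case2 i hi hp ih => rw [ffind_step p hi, if_neg hp] at h; exact ih h
  | case3 i hi => rw [ffind_stop p hi] at h; exact absurd h (by simp)

-- a search bounded by l ≤ m is the search bounded by m, cut off at l
theorem ffind_restrict (p : Int → Bool) (l m : Int) (hlm : l ≤ m) (i : Int) :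
    ffind p l i = match ffind p m i with
      | some j => if j < l then some j else none
      | none => none := by
  induction i using ffind.induct p m with
  | case1 i hi hp =>
      rw [ffind_step p hi, if_pos hp]
      by_cases hil : i < l
      · rw [ffind_step p hil, if_pos hp]; simp [hil]
      · rw [ffind_stop p hil]; simp [hil]
  | case2 i hi hp ih =>
      rw [ffind_step p hi, if_neg hp]
      by_cases hil : i < l
      · rw [ffind_step p hil, if_neg hp]; exact ih
      · rw [ffind_stop p hil]
        cases hj : ffind p m (i + 1) with
        | none => rfl
        | some j =>
            have := ffind_ge p m (i + 1) j hj
            simp [show ¬ j < l by omega]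
  | case3 i hi =>
      rw [ffind_stop p hi, ffind_stop p (by omega : ¬ i < l)]

-- A's loop computes the first index with dup-or-break, rendered
theorem ffind_or (p q : Int → Bool) (m i : Int) :
    ffind (fun j => p j || q j) m i = omin (ffind p m i) (ffind q m i) := by
  induction i using ffind.induct (fun j => p j || q j) m with
  | case1 i hi hp =>
      rw [ffind_step _ hi, if_pos hp]
      rcases Bool.or_eq_true_iff.mp hp with h | h
      · rw [ffind_step p hi, if_pos h]
        cases hq : ffind q m i with
        | none => simp [omin]
        | some j =>
            have hij := ffind_ge q m i j hq
            simp [omin, min_eq_left hij]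
      · by_cases hpp : p i
        · rw [ffind_step p hi, if_pos hpp, ffind_step q hi, if_pos h]
          simp [omin]
        · rw [ffind_step p hi, if_neg hpp, ffind_step q hi, if_pos h]
          cases hp' : ffind p m (i + 1) with
          | none => simp [omin]
          | some j =>
              have hij := ffind_ge p m (i + 1) j hp'
              simp [omin, min_eq_right (by omega : i ≤ j)]
  | case2 i hi hp ih =>
      have hp' : p i = false := by cases hpi : p i <;> simp [hpi] at hp ⊢
      have hq' : q i = false := by cases hqi : q i <;> simp [hqi, hp'] at hp ⊢
      rw [ffind_step _ hi, if_neg (by simp [hp', hq']), ffind_step p hi, if_neg (by simp [hp']),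
        ffind_step q hi, if_neg (by simp [hq'])]
      exact ih
  | case3 i hi =>
      rw [ffind_stop _ hi, ffind_stop p hi, ffind_stop q hi]
      rfl

-- Python-mod congruence along a divisibility: mod x n = mod y n whenever n ∣ x - y
theorem eq_zero_of_mul_abs_lt {n t : Int} (h : |n * t| < |n|) : t = 0 := by
  have hn : n ≠ 0 := by rintro rfl; simp at h
  rw [abs_mul] at h
  have ht := (mul_lt_iff_lt_one_right (abs_pos.mpr hn)).mp h
  have := abs_lt.mp ht
  omega

theorem pymod_congr (n x y : Int) (h : n ∣ x - y) : PySem.Int.mod x n = PySem.Int.mod y n := by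
  by_cases hn : n = 0
  · subst hn
    have hxy : x = y := by have := Int.zero_dvd.mp h; omega
    rw [hxy]
  · obtain ⟨k, hk⟩ := h
    have hx := PySem.Int.floordiv_mul_add_mod x n
    have hy := PySem.Int.floordiv_mul_add_mod y n
    have hdiff : PySem.Int.mod x n - PySem.Int.mod y n =
        n * (k - PySem.Int.floordiv x n + PySem.Int.floordiv y n) := by nlinarith [hx, hy]
    have habs : |n * (k - PySem.Int.floordiv x n + PySem.Int.floordiv y n)| < |n| := by
      rcases lt_or_gt_of_ne hn with hneg | hpos
      · have h1 := PySem.Int.mod_neg_bounds x hneg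
        have h2 := PySem.Int.mod_neg_bounds y hneg
        rw [abs_of_neg hneg, abs_lt]
        constructor <;> omega
      · have h1l := PySem.Int.mod_nonneg x hpos
        have h1u := PySem.Int.mod_lt x hpos
        have h2l := PySem.Int.mod_nonneg y hpos
        have h2u := PySem.Int.mod_lt y hpos
        rw [abs_of_pos hpos, abs_lt]
        constructor <;> omega
    have ht := eq_zero_of_mul_abs_lt habs
    rw [ht, mul_zero] at hdiff
    omega

def render (n : Int) : Option Int → List Int
  | none => [0, 0]
  | some j => [PySem.Int.mod j n + 1, PySem.Int.floordiv j n + 1]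

theorem loopA_eq (n : Int) (words : List String) (i : Int) :
    ∀ count : Int, PySem.Int.mod count n = PySem.Int.mod i n →
    solutionLoopA n words (PySem.List.pyRange i (words.length : Int) 1) count =
      render n (ffind (fun j => dupAt words j || breakAt words j) (words.length : Int) i) := by
  induction i using ffind.induct (fun j => dupAt words j || breakAt words j)
      (words.length : Int) with
  | case1 i hi hp =>
      intro count hc
      rw [PySem.List.pyRange_one_cons hi, ffind_step _ hi, if_pos hp]
      simp only [solutionLoopA]
      rw [if_pos]
      · simp [render, hc]
      · simp only [dupAt, breakAt, Bool.or_eq_true, decide_eq_true_eq] at hp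
        exact hp
  | case2 i hi hp ih =>
      intro count hc
      rw [PySem.List.pyRange_one_cons hi, ffind_step _ hi, if_neg hp]
      simp only [solutionLoopA]
      rw [if_neg]
      · apply ih
        rw [hc]
        apply pymod_congr
        have := PySem.Int.floordiv_mul_add_mod i n
        exact ⟨-(PySem.Int.floordiv i n), by linarith⟩
      · simp only [dupAt, breakAt, Bool.or_eq_true, decide_eq_true_eq] at hp
        push Not at hp
        intro hcon
        rcases hcon with h | h
        · exact hp.1 h
        · exact h hp.2
  | case3 i hi =>
      intro count _
      have hz : (((words.length : Int)) - i).toNat = 0 := by omega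
      rw [ffind_stop _ hi]
      rw [show PySem.List.pyRange i (words.length : Int) 1 = [] by
        rw [PySem.List.pyRange_one, hz]; rfl]
      rfl

theorem breakScan_eq (words : List String) (m : Int) (i : Int) :
    breakScan words (PySem.List.pyRange i m 1) = ffind (breakAt words) m i := by
  induction i using ffind.induct (breakAt words) m with
  | case1 i hi hp =>
      rw [PySem.List.pyRange_one_cons hi, ffind_step _ hi, if_pos hp]
      simp only [breakScan]
      rw [if_pos]
      simpa [breakAt] using hp
  | case2 i hi hp ih =>
      rw [PySem.List.pyRange_one_cons hi, ffind_step _ hi, if_neg hp]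
      simp only [breakScan]
      rw [if_neg]
      · exact ih
      · simpa [breakAt] using hp
  | case3 i hi =>
      have hz : (m - i).toNat = 0 := by omega
      rw [ffind_stop _ hi]
      rw [show PySem.List.pyRange i m 1 = [] by
        rw [PySem.List.pyRange_one, hz]; rfl]
      rfl

theorem dupAt_nat (words : List String) (i : Nat) (hi : i < words.length) :
    dupAt words (i : Int) = decide (words[i] ∈ words.take i) := by
  simp only [dupAt]
  rw [PySem.List.slice_zero_start, PySem.List.slice_to words (by omega : (0:Int) ≤ (i:Int))]
  simp [PySem.List.pyGet?_natCast, List.getElem?_eq_getElem hi]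

theorem dupScan_eq (words : List String) (k : Nat) :
    ∀ (i : Nat) (seen : PySem.Set String), words.length - i ≤ k →
    (∀ w, w ∈ seen ↔ w ∈ words.take i) →
    dupScan (words.drop i) (i : Int) seen =
      ffind (dupAt words) (words.length : Int) (i : Int) := by
  induction k with
  | zero =>
      intro i seen hk _
      have hge : words.length ≤ i := by omega
      rw [List.drop_eq_nil_of_le hge]
      rw [ffind_stop _ (by exact_mod_cast not_lt.mpr (by exact_mod_cast hge))]
      rfl
  | succ k ih =>
      intro i seen hk hseen
      by_cases hi : i < words.length
      · rw [List.drop_eq_getElem_cons hi]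
        simp only [dupScan]
        have hii : (i : Int) < (words.length : Int) := by exact_mod_cast hi
        rw [ffind_step _ hii, dupAt_nat words i hi]
        by_cases hmem : words[i] ∈ words.take i
        · rw [if_pos ((hseen _).mpr hmem), if_pos (by simpa using hmem)]
        · rw [if_neg (fun h => hmem ((hseen _).mp h)), if_neg (by simpa using hmem)]
          have hcast : (i : Int) + 1 = ((i + 1 : Nat) : Int) := by push_cast; ring
          rw [hcast]
          apply ih (i + 1) _ (by omega)
          intro w
          rw [PySem.Set.mem_add]
          have hta : words.take (i + 1) = words.take i ++ [words[i]] := by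
            rw [List.take_add_one, List.getElem?_eq_getElem hi]; rfl
          rw [hta, List.mem_append, List.mem_singleton, hseen w]
      · rw [List.drop_eq_nil_of_le (by omega)]
        rw [ffind_stop _ (by exact_mod_cast not_lt.mpr (by omega))]
        rfl

theorem dupAt_zero (words : List String) : dupAt words 0 = false := by
  simp [dupAt, PySem.List.slice_zero_start]
  rw [PySem.List.slice_to words (by omega : (0:Int) ≤ 0)]
  simp

-- ===== VERDICT (by name: the statement is the Claim_ definition above) =====
theorem solution_spec : Claim_equal_solution := by
  intro n words _ _
  unfold Spec_solution
  show solution n words = solution_alt n words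
  unfold solution solution_alt
  rw [loopA_eq n words 1 1 rfl,
    ffind_or (dupAt words) (breakAt words) (words.length : Int) 1]
  have hdup0 : dupScan words 0 PySem.Set.empty =
      ffind (dupAt words) (words.length : Int) 0 := by
    have := dupScan_eq words words.length 0 PySem.Set.empty (by omega)
      (by intro w; simp [PySem.Set.empty])
    simpa using this
  have hdup01 : ffind (dupAt words) (words.length : Int) 0 =
      ffind (dupAt words) (words.length : Int) 1 := by
    by_cases hm : (0 : Int) < (words.length : Int)
    · rw [ffind_step _ hm, dupAt_zero, if_neg (by simp), show (0:Int) + 1 = 1 from rfl]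
    · rw [ffind_stop _ hm, ffind_stop _ (by omega)]
  cases hd : ffind (dupAt words) (words.length : Int) 1 with
  | none =>
      have hfd : dupScan words 0 PySem.Set.empty = none := by rw [hdup0, hdup01, hd]
      simp only [hfd]
      rw [breakScan_eq words (words.length : Int) 1]
      cases hb : ffind (breakAt words) (words.length : Int) 1 with
      | none => rfl
      | some b => rfl
  | some d =>
      have hfd : dupScan words 0 PySem.Set.empty = some d := by rw [hdup0, hdup01, hd]
      have hdlen : d ≤ (words.length : Int) :=
        le_of_lt (ffind_lt (dupAt words) (words.length : Int) 1 d hd)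
      simp only [hfd]
      rw [breakScan_eq words d 1,
        ffind_restrict (breakAt words) d (words.length : Int) hdlen 1]
      cases hb : ffind (breakAt words) (words.length : Int) 1 with
      | none => simp [omin, render]
      | some b =>
          by_cases hbd : b < d
          · simp [omin, render, hbd, min_eq_right (le_of_lt hbd)]
          · simp [omin, render, hbd, min_eq_left (by omega : d ≤ b)]
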